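-- pv_equiv track=rewrite | github.com/alexandraback/datacollection | solutions_5636311922769920_1/Python/SerVasilich/Task_D.py | fnd
-- ===== SOURCE A (Python) =====
-- def fnd(k,c,s):
--     ans=[]
--     t=cc=d=1
--     while t<=k:
--         if cc==c:
--             ans+=[str(d)]
--             if t==k: break
--         if t<k: t+=1
--         if cc==c: d=t; cc=1
--         else: d=d*k-k+t; cc+=1
--     return "IMPOSSIBLE" if len(ans)>s else ' '.join(ans)
-- ===== SOURCE B (Python) =====
-- def fnd(k, c, s):
--     tiles = 0 if k <= 0 else (k + c - 1) // c
--     if tiles > s: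
--         return "IMPOSSIBLE"
--     parts = []
--     for i in range(tiles):
--         d = 0
--         for j in range(c):
--             d = d * k + min(i * c + j, k - 1)
--         parts.append(str(d + 1))
--     return ' '.join(parts)
-- ===== Notes on version B (the rewrite author's own statement) =====
-- stated objective: simpler
-- what changed: Replaces A's single interleaved state-machine while-loop over (t,cc,d) with an explicit outer loop over the ceil(k/c) tiles and an inner loop computing each tile's base-k value directly via min(i*c+j, k-1), deciding IMPOSSIBLE up front from the tile count.
import Mathlib
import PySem

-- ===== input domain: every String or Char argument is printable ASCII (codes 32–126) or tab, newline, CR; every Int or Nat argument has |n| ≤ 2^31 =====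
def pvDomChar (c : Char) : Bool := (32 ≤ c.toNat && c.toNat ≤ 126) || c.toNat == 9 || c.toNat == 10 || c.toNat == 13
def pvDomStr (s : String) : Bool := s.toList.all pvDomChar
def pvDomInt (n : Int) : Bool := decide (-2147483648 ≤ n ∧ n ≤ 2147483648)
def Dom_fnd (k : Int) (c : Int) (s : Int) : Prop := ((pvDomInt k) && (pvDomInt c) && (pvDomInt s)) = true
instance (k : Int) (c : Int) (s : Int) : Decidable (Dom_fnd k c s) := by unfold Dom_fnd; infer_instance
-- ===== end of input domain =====

-- B replaces A's interleaved state-machine while-loop (t, cc, d with early break) by an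
-- explicit outer loop over the ceil(k/c) tiles with an inner loop building each tile's
-- base-k value directly; objective: simpler.

-- ===== PORT A =====
-- Literal port of A's while-loop; fuel bounds the iteration count (the loop runs at most
-- k + c iterations when it terminates), it is only a totality device.
def fndLoop (k c : Int) : Nat → List String → Int → Int → Int → List String
  | 0, ans, _, _, _ => ans
  | fuel + 1, ans, t, cc, d =>
    if t ≤ k then
      let ans' := if cc = c then ans ++ [PySem.Int.toStr d] else ans
      if cc = c ∧ t = k then ans'
      else
        let t' := if t < k then t + 1 else t
        if cc = c then fndLoop k c fuel ans' t' 1 t'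
        else fndLoop k c fuel ans' t' (cc + 1) (d * k - k + t')
    else ans

def fnd (k : Int) (c : Int) (s : Int) : String :=
  let ans := fndLoop k c (k + c).toNat [] 1 1 1
  if (ans.length : Int) > s then "IMPOSSIBLE" else PySem.Str.join " " ans

-- ===== PORT B =====
def fnd_alt (k : Int) (c : Int) (s : Int) : String :=
  let tiles : Int := if k ≤ 0 then 0 else PySem.Int.floordiv (k + c - 1) c
  if tiles > s then "IMPOSSIBLE"
  else
    PySem.Str.join " "
      ((PySem.List.pyRange 0 tiles 1).map (fun i =>
        PySem.Int.toStr
          ((PySem.List.pyRange 0 c 1).foldl (fun d j => d * k + min (i * c + j) (k - 1)) 0 + 1)))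

-- ===== PRECONDITION & SPEC =====
-- A's while-loop never terminates when k ≥ 1 and c ≤ 0 (cc starts at 1 and only grows, so
-- cc == c never fires and t is stuck at k); Pre_ excludes exactly those diverging inputs.
def Pre_fnd (k : Int) (c : Int) (s : Int) : Prop := k ≤ 0 ∨ 1 ≤ c
instance (k : Int) (c : Int) (s : Int) : Decidable (Pre_fnd k c s) := by unfold Pre_fnd; infer_instance
def pvWitness_fnd : Int × Int × Int := (7, 3, 5)

def Spec_fnd (k : Int) (c : Int) (s : Int) (out : String) : Prop := out = fnd_alt k c s
instance (k : Int) (c : Int) (s : Int) (out : String) : Decidable (Spec_fnd k c s out) := by unfold Spec_fnd; infer_instance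

-- ===== CLAIM (what is proved, stated in full; the proofs are below) =====
def Claim_equal_fnd : Prop := ∀ (k : Int) (c : Int) (s : Int), Dom_fnd k c s → Pre_fnd k c s → Spec_fnd k c s (fnd k c s)

-- ===== LEMMAS AND PROOFS =====

-- partial base-k value of tile i after its first m digits (0-based digits min(i*c+j, k-1))
def pvPart (k c i m : Int) : Int :=
  (PySem.List.pyRange 0 m 1).foldl (fun d j => d * k + min (i * c + j) (k - 1)) 0

lemma pvPart_succ (k c i m : Int) (hm : 0 ≤ m) :
    pvPart k c i (m + 1) = pvPart k c i m * k + min (i * c + m) (k - 1) := by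
  unfold pvPart
  rw [PySem.List.pyRange_one_succ_right hm, List.foldl_append]
  rfl

lemma pvPart_one (k c i : Int) : pvPart k c i 1 = min (i * c) (k - 1) := by
  have h : PySem.List.pyRange 0 1 1 = [0] := by decide
  unfold pvPart
  rw [h]
  simp

-- main invariant of A's loop: from the state "tile i, cc digits of it absorbed", the loop
-- appends exactly the string values of tiles i .. R-1, R = ceil(k/c) = (k+c-1) floordiv c.
lemma fndLoop_inv (k c : Int) (hk : 1 ≤ k) (hc : 1 ≤ c) :
    ∀ (fuel : Nat) (i cc : Int) (ans : List String),
      0 ≤ i → 1 ≤ cc → cc ≤ c → i * c + 1 ≤ k →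
      k + c - (i * c + cc) ≤ (fuel : Int) →
      fndLoop k c fuel ans (min (i * c + cc) k) cc (pvPart k c i cc + 1)
        = ans ++ (PySem.List.pyRange i (PySem.Int.floordiv (k + c - 1) c) 1).map
            (fun t => PySem.Int.toStr (pvPart k c t c + 1)) := by
  intro fuel
  induction fuel with
  | zero =>
    intro i cc ans hi hcc1 hccc hik hfuel
    exfalso
    push_cast at hfuel
    omega
  | succ n ih =>
    intro i cc ans hi hcc1 hccc hik hfuel
    have ht : min (i * c + cc) k ≤ k := min_le_right _ _
    rw [fndLoop, if_pos ht]
    by_cases hccEq : cc = c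
    · -- a full tile: append its string
      rw [hccEq]
      by_cases htk : min (i * c + c) k = k
      · -- break: this is the last tile, R = i + 1
        rw [if_pos (And.intro rfl htk)]
        have hge : k ≤ i * c + c := by omega
        have e1 : (i + 1) * c = i * c + c := by ring
        have e2 : (i + 1 + 1) * c = i * c + 2 * c := by ring
        have hR : PySem.Int.floordiv (k + c - 1) c = i + 1 := by
          rw [PySem.Int.floordiv_eq_iff_of_pos (by omega)]
          omega
        rw [hR, PySem.List.pyRange_one_singleton]
        simp
      · -- not last: move to tile i+1
        rw [if_neg (by simp [htk]), if_pos rfl]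
        have e1 : (i + 1) * c = i * c + c := by ring
        have htlt : min (i * c + c) k < k := by omega
        rw [if_pos htlt]
        have ht' : min (i * c + c) k + 1 = min ((i + 1) * c + 1) k := by omega
        rw [ht']
        have hd' : min ((i + 1) * c + 1) k = pvPart k c (i + 1) 1 + 1 := by
          rw [pvPart_one]; omega
        have H := ih (i + 1) 1 (ans ++ [PySem.Int.toStr (pvPart k c i c + 1)])
          (by omega) le_rfl hc (by omega) (by push_cast at hfuel ⊢; omega)
        rw [← hd'] at H
        rw [if_pos (rfl : c = c), H]
        have hiR : i < PySem.Int.floordiv (k + c - 1) c := by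
          have h1 := (PySem.Int.le_floordiv_iff_mul_le (a := k + c - 1) (b := c)
            (q := i + 1) (by omega)).2 (by omega)
          omega
        rw [PySem.List.pyRange_one_cons hiR]
        simp
    · -- inside a tile: absorb one more digit
      rw [if_neg (by simp [hccEq])]
      simp only [if_neg hccEq]
      have hcclt : cc < c := lt_of_le_of_ne hccc hccEq
      by_cases hlt : min (i * c + cc) k < k
      · rw [if_pos hlt]
        have hlt' : i * c + cc < k := by omega
        have ht' : min (i * c + cc) k + 1 = min (i * c + (cc + 1)) k := by omega
        rw [ht']
        have hd' : (pvPart k c i cc + 1) * k - k + min (i * c + (cc + 1)) k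
            = pvPart k c i (cc + 1) + 1 := by
          rw [pvPart_succ k c i cc (by omega)]
          have hm : min (i * c + (cc + 1)) k = min (i * c + cc) (k - 1) + 1 := by omega
          rw [hm]; ring
        rw [hd']
        exact ih i (cc + 1) ans hi (by omega) (by omega) hik (by push_cast at hfuel ⊢; omega)
      · rw [if_neg hlt]
        have hge : k ≤ i * c + cc := by omega
        have ht' : min (i * c + cc) k = min (i * c + (cc + 1)) k := by omega
        rw [ht']
        have hd' : (pvPart k c i cc + 1) * k - k + min (i * c + (cc + 1)) k
            = pvPart k c i (cc + 1) + 1 := by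
          rw [pvPart_succ k c i cc (by omega)]
          have h1 : min (i * c + (cc + 1)) k = k := by omega
          have h2 : min (i * c + cc) (k - 1) = k - 1 := by omega
          rw [h1, h2]; ring
        rw [hd']
        exact ih i (cc + 1) ans hi (by omega) (by omega) hik (by push_cast at hfuel ⊢; omega)

-- the full run of A's loop produces exactly B's list of tile strings (k ≥ 1, c ≥ 1)
lemma fndLoop_eq (k c : Int) (hk : 1 ≤ k) (hc : 1 ≤ c) :
    fndLoop k c (k + c).toNat [] 1 1 1
      = (PySem.List.pyRange 0 (PySem.Int.floordiv (k + c - 1) c) 1).map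
          (fun t => PySem.Int.toStr (pvPart k c t c + 1)) := by
  have h1 : (1 : Int) = min (0 * c + 1) k := by omega
  have h2 : (1 : Int) = pvPart k c 0 1 + 1 := by rw [pvPart_one]; omega
  calc fndLoop k c (k + c).toNat [] 1 1 1
      = fndLoop k c (k + c).toNat [] (min (0 * c + 1) k) 1 (pvPart k c 0 1 + 1) := by
        rw [← h1, ← h2]
    _ = _ := by
        rw [fndLoop_inv k c hk hc (k + c).toNat 0 1 [] le_rfl le_rfl hc (by omega)
          (by rw [Int.toNat_of_nonneg (by omega)]; omega)]
        simp

-- degenerate side: k ≤ 0 means A's loop exits at once (t = 1 > k) with ans = []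
lemma fndLoop_nonpos (k c : Int) (hk : k ≤ 0) (fuel : Nat) :
    fndLoop k c fuel [] 1 1 1 = [] := by
  cases fuel with
  | zero => rfl
  | succ n => rw [fndLoop, if_neg (by omega)]

-- ===== VERDICT (by name: the statement is the Claim_ definition above) =====
theorem fnd_spec : Claim_equal_fnd := by
  intro k c s _ hpre
  unfold Spec_fnd fnd fnd_alt
  by_cases hk : k ≤ 0
  · rw [fndLoop_nonpos k c hk, if_pos hk]
    simp [PySem.List.pyRange_one_eq_nil]
  · have hk1 : 1 ≤ k := by omega
    have hc : 1 ≤ c := by unfold Pre_fnd at hpre; omega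
    rw [fndLoop_eq k c hk1 hc, if_neg hk]
    have hR0 : 0 ≤ PySem.Int.floordiv (k + c - 1) c :=
      (PySem.Int.le_floordiv_iff_mul_le (q := 0) (by omega)).2 (by omega)
    simp only [List.length_map, PySem.List.length_pyRange_one]
    have hcast : (((PySem.Int.floordiv (k + c - 1) c - 0).toNat : Nat) : Int)
        = PySem.Int.floordiv (k + c - 1) c := by omega
    rw [hcast]
    rfl
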